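-- pv_equiv track=rewrite | github.com/AKranz-dev/LeetCode | Accepted/SmallestEvenMultiple.py | smallestEvenMultiple
-- ===== SOURCE A (Python) =====
-- def smallestEvenMultiple(n: int) -> int:
--     counter = 0
--     while True:
--         num =  n+counter
--         if num%2==0 and num%n ==0:
--             return num
--         else:
--             counter +=1
-- ===== SOURCE B (Python) =====
-- def smallestEvenMultiple(n: int) -> int:
--     return n if n % 2 == 0 else 2 * n
-- ===== Notes on version B (the rewrite author's own statement) =====
-- stated objective: faster
-- what changed: Replaces A's linear upward search loop with the O(1) closed form 'n if n is even else 2*n'.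
-- intended difference: For odd negative n, A's upward search first hits 0 (the first even multiple of n that is >= n) and returns 0, while B returns 2*n, the even multiple the closed form intends; a smallest even multiple does not exist for negative n, and 2*n is the natural value of the formula. — e.g. on smallestEvenMultiple(-3): A returns 0, B returns -6
import Mathlib
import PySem

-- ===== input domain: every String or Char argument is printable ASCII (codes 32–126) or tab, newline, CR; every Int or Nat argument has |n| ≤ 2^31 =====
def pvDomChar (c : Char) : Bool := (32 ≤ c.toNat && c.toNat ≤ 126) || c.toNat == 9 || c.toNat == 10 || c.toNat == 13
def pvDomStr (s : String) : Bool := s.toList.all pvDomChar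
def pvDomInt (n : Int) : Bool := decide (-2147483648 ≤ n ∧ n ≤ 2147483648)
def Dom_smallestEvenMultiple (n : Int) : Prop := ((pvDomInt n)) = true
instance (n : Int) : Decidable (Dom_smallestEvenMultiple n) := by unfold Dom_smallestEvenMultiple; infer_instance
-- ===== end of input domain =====

-- B replaces A's linear upward search with the O(1) closed form 'n if even else 2*n'.

-- ===== PORT A =====
-- A's 'while True' loop, with fuel n.natAbs + 1 (enough for every n ≠ 0; fuel only
-- makes the recursion total, the computation is A's step for step).
def smallestEvenMultipleLoop (n : Int) : Nat → Int → Int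
  | 0, _ => 0
  | fuel + 1, counter =>
    let num := n + counter
    if PySem.Int.mod num 2 = 0 ∧ PySem.Int.mod num n = 0 then num
    else smallestEvenMultipleLoop n fuel (counter + 1)

def smallestEvenMultiple (n : Int) : Int :=
  smallestEvenMultipleLoop n (n.natAbs + 1) 0

-- ===== PORT B =====
def smallestEvenMultiple_alt (n : Int) : Int :=
  if PySem.Int.mod n 2 = 0 then n else 2 * n

-- ===== PRECONDITION & SPEC =====
-- Pre_ excludes only n = 0, where A raises ZeroDivisionError (num % n on the first iteration).
def Pre_smallestEvenMultiple (n : Int) : Prop := n ≠ 0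
instance (n : Int) : Decidable (Pre_smallestEvenMultiple n) := by
  unfold Pre_smallestEvenMultiple; infer_instance
def pvWitness_smallestEvenMultiple : Int := 7

-- For odd negative n, A's upward search first hits 0 (the first even multiple of n that is ≥ n)
-- and returns 0, while B returns 2*n, the even multiple the closed form intends; a smallest even
-- multiple does not exist for negative n, and 2*n is the natural value of the formula.
def D_smallestEvenMultiple (n : Int) : Prop := n < 0 ∧ n % 2 = 1
instance (n : Int) : Decidable (D_smallestEvenMultiple n) := by
  unfold D_smallestEvenMultiple; infer_instance

def Spec_smallestEvenMultiple (n : Int) (out : Int) : Prop :=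
  ¬ D_smallestEvenMultiple n → out = smallestEvenMultiple_alt n
instance (n : Int) (out : Int) : Decidable (Spec_smallestEvenMultiple n out) := by
  unfold Spec_smallestEvenMultiple; infer_instance

def pvDiffWitness_smallestEvenMultiple : Int := -3
def pvDiffWitnessOut_smallestEvenMultiple : Int × Int := (0, -6)

-- ===== CLAIM =====
def Claim_unchanged_smallestEvenMultiple : Prop := ∀ (n : Int), Dom_smallestEvenMultiple n → Pre_smallestEvenMultiple n → Spec_smallestEvenMultiple n (smallestEvenMultiple n)
def Claim_changed_smallestEvenMultiple : Prop := Dom_smallestEvenMultiple (pvDiffWitness_smallestEvenMultiple) ∧ Pre_smallestEvenMultiple (pvDiffWitness_smallestEvenMultiple) ∧ D_smallestEvenMultiple (pvDiffWitness_smallestEvenMultiple) ∧ smallestEvenMultiple (pvDiffWitness_smallestEvenMultiple) = pvDiffWitnessOut_smallestEvenMultiple.1 ∧ smallestEvenMultiple_alt (pvDiffWitness_smallestEvenMultiple) = pvDiffWitnessOut_smallestEvenMultiple.2 ∧ pvDiffWitnessOut_smallestEvenMultiple.1 ≠ pvDiffWitnessOut_smallestEvenMultiple.2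
def Claim_exact_smallestEvenMultiple : Prop := ∀ (n : Int), Dom_smallestEvenMultiple n → Pre_smallestEvenMultiple n → D_smallestEvenMultiple n → smallestEvenMultiple n ≠ smallestEvenMultiple_alt n

-- ===== LEMMAS AND PROOFS =====

-- the loop's mod tests, for n ≠ 0, reduce to divisibility / emod facts
theorem loop_mod_two (num : Int) : PySem.Int.mod num 2 = num % 2 :=
  PySem.Int.mod_eq_emod_of_pos (by omega)

-- even n: the first iteration already returns n
theorem loop_even (n : Int) (fuel : Nat) (he : n % 2 = 0) :
    smallestEvenMultipleLoop n (fuel + 1) 0 = n := by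
  have h2 : PySem.Int.mod (n + 0) 2 = 0 := by rw [loop_mod_two]; omega
  have hs : PySem.Int.mod (n + 0) n = 0 := by
    rw [PySem.Int.mod_eq_zero_iff_dvd _ _]; exact ⟨1, by ring⟩
  simp only [smallestEvenMultipleLoop]
  rw [if_pos ⟨h2, hs⟩]
  omega

-- odd positive n: the loop runs until counter = n and returns 2*n
theorem loop_odd_pos (n : Int) (_hn : 0 < n) (ho : n % 2 = 1) :
    ∀ (fuel : Nat) (counter : Int), 0 ≤ counter → counter ≤ n →
      n - counter < fuel → smallestEvenMultipleLoop n fuel counter = 2 * n := by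
  intro fuel
  induction fuel with
  | zero => intro counter _ _ h; omega
  | succ f ih =>
    intro counter h0 hle hf
    by_cases hend : counter = n
    · rw [hend]
      have h2 : PySem.Int.mod (n + n) 2 = 0 := by rw [loop_mod_two]; omega
      have hs : PySem.Int.mod (n + n) n = 0 := by
        rw [PySem.Int.mod_eq_zero_iff_dvd _ _]; exact ⟨2, by ring⟩
      simp only [smallestEvenMultipleLoop]
      rw [if_pos ⟨h2, hs⟩]
      ring
    · have hlt : counter < n := lt_of_le_of_ne hle hend
      have hfail : ¬ (PySem.Int.mod (n + counter) 2 = 0 ∧ PySem.Int.mod (n + counter) n = 0) := by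
        rintro ⟨h2, hs⟩
        rw [loop_mod_two] at h2
        rw [PySem.Int.mod_eq_zero_iff_dvd _ _] at hs
        by_cases hc0 : counter = 0
        · subst hc0; omega
        · obtain ⟨k, hk⟩ := hs
          have : n ∣ counter := ⟨k - 1, by linear_combination hk⟩
          have hle' : n ≤ counter := Int.le_of_dvd (by omega) this
          omega
      simp only [smallestEvenMultipleLoop, if_neg hfail]
      exact ih (counter + 1) (by omega) (by omega) (by omega)

-- odd negative n: the loop runs until counter = -n (num = 0) and returns 0
theorem loop_odd_neg (n : Int) (hn : n < 0) (ho : n % 2 = 1) :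
    ∀ (fuel : Nat) (counter : Int), 0 ≤ counter → counter ≤ -n →
      -n - counter < fuel → smallestEvenMultipleLoop n fuel counter = 0 := by
  intro fuel
  induction fuel with
  | zero => intro counter _ _ h; omega
  | succ f ih =>
    intro counter h0 hle hf
    by_cases hend : counter = -n
    · rw [hend]
      have h2 : PySem.Int.mod (n + -n) 2 = 0 := by rw [loop_mod_two]; omega
      have hs : PySem.Int.mod (n + -n) n = 0 := by
        rw [PySem.Int.mod_eq_zero_iff_dvd _ _]; exact ⟨0, by ring⟩
      simp only [smallestEvenMultipleLoop]
      rw [if_pos ⟨h2, hs⟩]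
      omega
    · have hlt : counter < -n := lt_of_le_of_ne hle hend
      have hfail : ¬ (PySem.Int.mod (n + counter) 2 = 0 ∧ PySem.Int.mod (n + counter) n = 0) := by
        rintro ⟨h2, hs⟩
        rw [loop_mod_two] at h2
        rw [PySem.Int.mod_eq_zero_iff_dvd _ _] at hs
        by_cases hc0 : counter = 0
        · subst hc0; omega
        · obtain ⟨k, hk⟩ := hs
          have hd : n ∣ (n + counter) := ⟨k, hk⟩
          have habs : n.natAbs ∣ (n + counter).natAbs := Int.natAbs_dvd_natAbs.mpr hd
          have hne : (n + counter) ≠ 0 := by omega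
          have : n.natAbs ≤ (n + counter).natAbs :=
            Nat.le_of_dvd (by omega) habs
          omega
      simp only [smallestEvenMultipleLoop, if_neg hfail]
      exact ih (counter + 1) (by omega) (by omega) (by omega)

theorem smallestEvenMultiple_eq_zero_of_odd_neg (n : Int) (hn : n < 0) (ho : n % 2 = 1) :
    smallestEvenMultiple n = 0 := by
  unfold smallestEvenMultiple
  exact loop_odd_neg n hn ho _ 0 (by omega) (by omega) (by omega)

-- ===== VERDICT =====
theorem smallestEvenMultiple_spec : Claim_unchanged_smallestEvenMultiple := by
  intro n _ hn hD
  unfold Pre_smallestEvenMultiple at hn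
  unfold D_smallestEvenMultiple at hD
  unfold smallestEvenMultiple smallestEvenMultiple_alt
  rw [loop_mod_two]
  by_cases he : n % 2 = 0
  · rw [if_pos he]
    exact loop_even n _ he
  · have ho : n % 2 = 1 := by omega
    have hpos : 0 < n := by
      rcases lt_or_gt_of_ne hn with h | h
      · exact absurd ⟨h, ho⟩ hD
      · exact h
    rw [if_neg he]
    exact loop_odd_pos n hpos ho _ 0 (by omega) (by omega) (by omega)

theorem smallestEvenMultiple_changed : Claim_changed_smallestEvenMultiple := by
  unfold Claim_changed_smallestEvenMultiple; decide

theorem smallestEvenMultiple_tight : Claim_exact_smallestEvenMultiple := by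
  intro n _ hn hD
  unfold Pre_smallestEvenMultiple at hn
  obtain ⟨hneg, ho⟩ := hD
  rw [smallestEvenMultiple_eq_zero_of_odd_neg n hneg ho]
  unfold smallestEvenMultiple_alt
  rw [loop_mod_two, if_neg (by omega)]
  omega
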